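-- pv_equiv track=rewrite | github.com/stevepryde/spnaughts | robots/robot_base.py | get_unrotated_move
-- ===== SOURCE A (Python) =====
-- def get_unrotated_move(move, rotations):
--   """
--   Return the correct, unrotated move that corresponds to the move we would
--   make on a board rotated the specified number of times.
--   For example, if rotations is 1, and I want to get the corrected move for
--   move 0, this would return 6. If rotations is 2, and I want the corrected
--   move for 1, this would return 7.
--   """
--
--   rotations = int(rotations) % 4
--
--   # Don't do anything if we don't have to.
--   if (rotations == 0):
--     return move
--
--   transform_map = '630741852'
--   for rot_number in range(rotations):
--     move = int(transform_map[move])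
--
--   return move
-- ===== SOURCE B (Python) =====
-- def get_unrotated_move(move, rotations):
--   rotations = int(rotations) % 4
--   # rotations == 0: return move unchanged (same early return as the original).
--   if rotations == 0:
--     return move
--   # Precomposed permutation tables for 1, 2 and 3 rotations: a single lookup
--   # replaces the repeated application of the one-rotation map.
--   tables = ('630741852', '876543210', '258147036')
--   return int(tables[rotations - 1][move])
-- ===== Notes on version B (the rewrite author's own statement) =====
-- stated objective: simpler
-- what changed: Replaces the loop repeatedly applying the one-rotation permutation with a single lookup in precomposed permutation tables indexed by rotation count.
import Mathlib
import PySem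

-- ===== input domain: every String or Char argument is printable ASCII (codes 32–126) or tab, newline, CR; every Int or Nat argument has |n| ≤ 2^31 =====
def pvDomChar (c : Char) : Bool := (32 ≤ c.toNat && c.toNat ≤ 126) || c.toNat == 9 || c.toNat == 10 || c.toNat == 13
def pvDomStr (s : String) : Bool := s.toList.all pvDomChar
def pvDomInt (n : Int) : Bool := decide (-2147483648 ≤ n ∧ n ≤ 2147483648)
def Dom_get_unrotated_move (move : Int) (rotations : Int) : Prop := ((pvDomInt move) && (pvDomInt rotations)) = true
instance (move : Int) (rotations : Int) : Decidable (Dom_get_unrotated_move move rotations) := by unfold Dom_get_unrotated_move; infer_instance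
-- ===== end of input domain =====

-- B replaces A's loop of repeated one-rotation lookups by a single lookup in
-- precomposed permutation tables (objective: simpler).

-- ===== PORT A =====
-- '630741852' as digits: int(transform_map[m]) is this list indexed Python-style.
def get_unrotated_move (move : Int) (rotations : Int) : Int :=
  let rotations := PySem.Int.mod rotations 4
  if rotations = 0 then move
  else
    let transform_map : List Int := [6, 3, 0, 7, 4, 1, 8, 5, 2]
    -- pyGet? none = IndexError, excluded by Pre_; the .getD 0 default is never used there
    (PySem.List.pyRange 0 rotations 1).foldl
      (fun m _ => (PySem.List.pyGet? transform_map m).getD 0) move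

-- ===== PORT B =====
-- tables ('630741852','876543210','258147036') as digit lists
def get_unrotated_move_alt (move : Int) (rotations : Int) : Int :=
  let rotations := PySem.Int.mod rotations 4
  if rotations = 0 then move
  else
    let tables : List (List Int) :=
      [[6, 3, 0, 7, 4, 1, 8, 5, 2], [8, 7, 6, 5, 4, 3, 2, 1, 0], [2, 5, 8, 1, 4, 7, 0, 3, 6]]
    -- pyGet? none = IndexError, excluded by Pre_; defaults never used there
    (PySem.List.pyGet? ((PySem.List.pyGet? tables (rotations - 1)).getD []) move).getD 0

-- ===== PRECONDITION & SPEC =====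
-- Pre_ excludes exactly the inputs where A raises IndexError: when rotations % 4 ≠ 0,
-- move must be a valid Python index into the 9-character transform string.
def Pre_get_unrotated_move (move : Int) (rotations : Int) : Prop :=
  PySem.Int.mod rotations 4 = 0 ∨ (-9 ≤ move ∧ move < 9)
instance (move : Int) (rotations : Int) : Decidable (Pre_get_unrotated_move move rotations) := by
  unfold Pre_get_unrotated_move; infer_instance

def pvWitness_get_unrotated_move : Int × Int := (0, 1)

def Spec_get_unrotated_move (move : Int) (rotations : Int) (out : Int) : Prop :=
  out = get_unrotated_move_alt move rotations
instance (move : Int) (rotations : Int) (out : Int) : Decidable (Spec_get_unrotated_move move rotations out) := by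
  unfold Spec_get_unrotated_move; infer_instance

-- ===== CLAIM (what is proved, stated in full; the proofs are below) =====
def Claim_equal_get_unrotated_move : Prop := ∀ (move : Int) (rotations : Int), Dom_get_unrotated_move move rotations → Pre_get_unrotated_move move rotations → Spec_get_unrotated_move move rotations (get_unrotated_move move rotations)

-- ===== LEMMAS AND PROOFS =====

theorem get_unrotated_move_aux (move r : Int) (h0 : 0 ≤ r) (h4 : r < 4)
    (hpre : r = 0 ∨ (-9 ≤ move ∧ move < 9)) :
    (if r = 0 then move
     else (PySem.List.pyRange 0 r 1).foldl
       (fun m _ => (PySem.List.pyGet? ([6, 3, 0, 7, 4, 1, 8, 5, 2] : List Int) m).getD 0) move)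
    = (if r = 0 then move
       else (PySem.List.pyGet?
              ((PySem.List.pyGet?
                 ([[6, 3, 0, 7, 4, 1, 8, 5, 2], [8, 7, 6, 5, 4, 3, 2, 1, 0],
                   [2, 5, 8, 1, 4, 7, 0, 3, 6]] : List (List Int)) (r - 1)).getD []) move).getD 0) := by
  by_cases hr : r = 0
  · simp [hr]
  · rcases hpre with h | ⟨hlo, hhi⟩
    · exact absurd h hr
    · interval_cases r <;> first | exact absurd rfl hr | (interval_cases move <;> decide)

-- ===== VERDICT (by name: the statement is the Claim_ definition above) =====
theorem get_unrotated_move_spec : Claim_equal_get_unrotated_move := by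
  intro move rotations _ hpre
  unfold Spec_get_unrotated_move get_unrotated_move get_unrotated_move_alt
  have hpos : (0:Int) < 4 := by norm_num
  have hm : PySem.Int.mod rotations 4 = rotations % 4 := PySem.Int.mod_eq_emod_of_pos hpos
  unfold Pre_get_unrotated_move at hpre
  rw [hm] at hpre ⊢
  exact get_unrotated_move_aux move (rotations % 4)
    (Int.emod_nonneg _ (by norm_num)) (Int.emod_lt_of_pos _ hpos) hpre
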